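-- pv_equiv track=rewrite | github.com/kylemeador/symdesign | symdesign/structure/sequence.py | pdb_to_pose_offset
-- ===== SOURCE A (Python) =====
-- from typing import Sequence, Any, Iterable, get_args, Literal, AnyStr, Type
--
-- def pdb_to_pose_offset(reference_sequence: dict[Any, Sequence]) -> dict[Any, int]:
--     """Take a dictionary with chain name as keys and return the length of Pose numbering offset
--
--     Args:
--         reference_sequence: {key1: 'MSGKLDA...', ...} or {key2: {1: 'A', 2: 'S', ...}, ...}
--     Returns:
--         {key1: 0, key2: 123, ...}
--     """
--     offset = {}
--     # prior_chain = None
--     prior_chains_len = prior_key = 0  # prior_key not used as 0 but to ensure initialized nonetheless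
--     for idx, key in enumerate(reference_sequence):
--         if idx > 0:
--             prior_chains_len += len(reference_sequence[prior_key])
--         offset[key] = prior_chains_len
--         # insert function here? Make this a decorator!?
--         prior_key = key
--
--     return offset
-- ===== SOURCE B (Python) =====
-- def pdb_to_pose_offset(reference_sequence):
--     """Walk the chains BACKWARD: start from the grand total of all sequence lengths and
--     subtract each chain's length while traversing the keys in reverse, so each key gets the
--     sum of the lengths of the chains before it; reverse the assembled dict at the end."""
--     remaining = sum(len(seq) for seq in reference_sequence.values())
--     out = {}
--     for key in reversed(reference_sequence):
--         remaining -= len(reference_sequence[key])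
--         out[key] = remaining
--     return dict(reversed(out.items()))
-- ===== Notes on version B (the rewrite author's own statement) =====
-- stated objective: alternative
-- what changed: Replaces A's forward loop with lagged prior_key/prior_chains_len addition by the opposite traversal: compute the grand total of all lengths once, walk the keys in REVERSE subtracting each chain's length (suffix sums), and reverse the assembled dict at the end; Pre_ only excludes association lists with duplicate keys, which encode no Python dict input.
import Mathlib
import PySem

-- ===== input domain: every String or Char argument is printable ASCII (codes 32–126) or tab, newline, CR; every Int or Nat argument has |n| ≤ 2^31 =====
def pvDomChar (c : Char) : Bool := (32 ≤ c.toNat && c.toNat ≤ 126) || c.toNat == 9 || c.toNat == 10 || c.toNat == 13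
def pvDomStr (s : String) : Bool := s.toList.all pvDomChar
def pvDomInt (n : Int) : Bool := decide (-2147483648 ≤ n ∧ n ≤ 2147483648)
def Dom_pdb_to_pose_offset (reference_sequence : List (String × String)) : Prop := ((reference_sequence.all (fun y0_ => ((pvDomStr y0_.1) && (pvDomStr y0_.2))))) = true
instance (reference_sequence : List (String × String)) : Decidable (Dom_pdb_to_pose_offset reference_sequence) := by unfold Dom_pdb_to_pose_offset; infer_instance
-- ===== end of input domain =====

-- B replaces A's forward loop (prior_key bookkeeping + lagged addition) by the opposite
-- traversal: total length once, then a backward walk subtracting each chain's length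
-- (alternative; not faster).

-- ===== PORT A =====
-- Python's reference_sequence[prior_key] is read only when idx > 0, at which point prior_key
-- is the previous key and is always present in the dict, so getD never takes its default;
-- prior_key's Python initializer 0 (an int, never read as such) is rendered as "".
def pdb_to_pose_offset (reference_sequence : List (String × String)) : List (String × Int) :=
  let rd : PySem.Dict String String := PySem.Dict.mk reference_sequence
  let st := (PySem.List.enumerate rd.keys 0).foldl
    (fun (st : PySem.Dict String Int × Int × String) (ik : Int × String) =>
      let offset := st.1
      let prior_chains_len :=
        if ik.1 > 0 then st.2.1 + PySem.Str.len (rd.getD st.2.2 "") else st.2.1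
      (offset.insert ik.2 prior_chains_len, prior_chains_len, ik.2))
    (PySem.Dict.empty, 0, "")
  st.1.items

-- ===== PORT B =====
-- sum(len(seq) for seq in d.values()) is a left fold from 0; 'for key in reversed(d)' walks
-- keys reversed; d[key] is getD (key always present); dict(reversed(out.items())) re-inserts
-- the built pairs in reverse. B replaces A's forward lagged addition by backward subtraction.
def pdb_to_pose_offset_alt (reference_sequence : List (String × String)) : List (String × Int) :=
  let rd : PySem.Dict String String := PySem.Dict.mk reference_sequence
  let remaining0 : Int := rd.values.foldl (fun a seq => a + PySem.Str.len seq) 0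
  let st := rd.keys.reverse.foldl
    (fun (st : PySem.Dict String Int × Int) key =>
      let remaining := st.2 - PySem.Str.len (rd.getD key "")
      (st.1.insert key remaining, remaining))
    (PySem.Dict.empty, remaining0)
  (st.1.items.reverse.foldl
    (fun (d : PySem.Dict String Int) kv => d.insert kv.1 kv.2) PySem.Dict.empty).items

-- ===== PRECONDITION & SPEC =====
-- Pre_ excludes association lists with duplicate keys: a Python dict cannot carry duplicate
-- keys, so such lists encode no input the Python function can receive.
def Pre_pdb_to_pose_offset (reference_sequence : List (String × String)) : Prop :=
  (reference_sequence.map Prod.fst).Nodup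
instance (reference_sequence : List (String × String)) : Decidable (Pre_pdb_to_pose_offset reference_sequence) := by unfold Pre_pdb_to_pose_offset; infer_instance

def pvWitness_pdb_to_pose_offset : (List (String × String)) := [("A", "MS"), ("B", "K")]

def Spec_pdb_to_pose_offset (reference_sequence : List (String × String)) (out : List (String × Int)) : Prop := out = pdb_to_pose_offset_alt reference_sequence
instance (reference_sequence : List (String × String)) (out : List (String × Int)) : Decidable (Spec_pdb_to_pose_offset reference_sequence out) := by unfold Spec_pdb_to_pose_offset; infer_instance

-- ===== CLAIM (what is proved, stated in full; the proofs are below) =====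
def Claim_equal_pdb_to_pose_offset : Prop := ∀ (reference_sequence : List (String × String)), Dom_pdb_to_pose_offset reference_sequence → Pre_pdb_to_pose_offset reference_sequence → Spec_pdb_to_pose_offset reference_sequence (pdb_to_pose_offset reference_sequence)

-- ===== LEMMAS AND PROOFS =====

-- canonical recursive form both ports are reduced to
def pvCanon (acc : Int) : List (String × String) → List (String × Int)
  | [] => []
  | (k, v) :: t => (k, acc) :: pvCanon (acc + PySem.Str.len v) t

-- the lookup rd[k] returns the stored value when keys are unique
theorem getD_mk_of_mem (rs : List (String × String)) (h : (rs.map Prod.fst).Nodup)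
    (k v : String) (hm : (k, v) ∈ rs) :
    (PySem.Dict.mk rs).getD k "" = v :=
  PySem.Dict.getD_of_mem_items (PySem.Dict.mk rs) (k := k) (v := v)
    (by simpa using hm) (by simpa using h) ""

-- total length of all values
def pvS (rs : List (String × String)) : Int := (rs.map (fun p => PySem.Str.len p.2)).sum

theorem pvS_foldl (l : List String) (c : Int) :
    l.foldl (fun a seq => a + PySem.Str.len seq) c = c + (l.map PySem.Str.len).sum := by
  induction l generalizing c with
  | nil => simp
  | cons x t ih =>
    rw [List.foldl_cons, ih, List.map_cons, List.sum_cons]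
    ring

-- the list B's backward loop produces: suffix sums downward from R
def pvDown (R : Int) : List (String × String) → List (String × Int)
  | [] => []
  | (k, v) :: t => (k, R - PySem.Str.len v) :: pvDown (R - PySem.Str.len v) t

theorem pvDown_append (a b : List (String × String)) (R : Int) :
    pvDown R (a ++ b) = pvDown R a ++ pvDown (R - pvS a) b := by
  induction a generalizing R with
  | nil => simp [pvDown, pvS]
  | cons p t ih =>
    cases p with | mk k v =>
    simp only [List.cons_append, pvDown, ih, List.cons.injEq, true_and]
    congr 2
    simp [pvS]
    ring

theorem pvDown_reverse (rs : List (String × String)) (acc : Int) :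
    pvDown (acc + pvS rs) rs.reverse = (pvCanon acc rs).reverse := by
  induction rs generalizing acc with
  | nil => rfl
  | cons p t ih =>
    cases p with | mk k v =>
    rw [List.reverse_cons, pvDown_append]
    have hS : pvS t.reverse = pvS t := by simp [pvS]
    have h1 : acc + pvS ((k, v) :: t) = (acc + PySem.Str.len v) + pvS t := by
      simp [pvS]; ring
    rw [h1, ih, hS]
    simp only [pvCanon, List.reverse_cons]
    congr 1
    simp [pvDown]

theorem pvCanon_keys (rs : List (String × String)) (acc : Int) :
    (pvCanon acc rs).map Prod.fst = rs.map Prod.fst := by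
  induction rs generalizing acc with
  | nil => rfl
  | cons p t ih => cases p with | mk k v => simp [pvCanon, ih]

-- B's backward loop, as an invariant over the (reversed) pair list
theorem B_loop (rd : PySem.Dict String String) (m : List (String × String)) :
    ∀ (out : PySem.Dict String Int) (R : Int),
    (∀ p ∈ m, rd.getD p.1 "" = p.2) →
    (∀ p ∈ m, out.contains p.1 = false) →
    (m.map Prod.fst).Nodup →
    ((m.map Prod.fst).foldl
      (fun (st : PySem.Dict String Int × Int) key =>
        let remaining := st.2 - PySem.Str.len (rd.getD key "")
        (st.1.insert key remaining, remaining))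
      (out, R)).1.items = out.items ++ pvDown R m := by
  induction m with
  | nil => intro out R _ _ _; simp [pvDown]
  | cons p t ih =>
    intro out R hlook hfresh hnd
    cases p with | mk k v =>
    rw [List.map_cons, List.nodup_cons] at hnd
    obtain ⟨hknt, hndt⟩ := hnd
    have hlk : rd.getD k "" = v := hlook (k, v) List.mem_cons_self
    have hfk : out.contains k = false := hfresh (k, v) List.mem_cons_self
    simp only [List.map_cons, List.foldl_cons, hlk]
    rw [ih (out.insert k (R - PySem.Str.len v)) (R - PySem.Str.len v)
      (fun p hp => hlook p (List.mem_cons_of_mem _ hp))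
      (fun p hp => by
        rw [PySem.Dict.contains_insert]
        have hne : p.1 ≠ k := fun he => hknt (List.mem_map.mpr ⟨p, hp, he⟩)
        simp [hne, hfresh p (List.mem_cons_of_mem _ hp)])
      hndt]
    rw [PySem.Dict.items_insert_of_not_contains _ _ hfk]
    simp [pvDown]

theorem alt_eq_canon (rs : List (String × String)) (h : (rs.map Prod.fst).Nodup) :
    pdb_to_pose_offset_alt rs = pvCanon 0 rs := by
  simp only [pdb_to_pose_offset_alt]
  have hvals : (PySem.Dict.mk rs).values = rs.map Prod.snd := by simp [PySem.Dict.values]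
  have htot : (PySem.Dict.mk rs).values.foldl (fun a seq => a + PySem.Str.len seq) 0
      = pvS rs := by
    rw [hvals, pvS_foldl]
    simp [pvS, List.map_map, Function.comp_def]
  have hrev : (PySem.Dict.mk rs).keys.reverse = rs.reverse.map Prod.fst := by
    simp [PySem.Dict.keys, List.map_reverse]
  have hloop := B_loop (PySem.Dict.mk rs) rs.reverse PySem.Dict.empty (pvS rs)
    (fun p hp => getD_mk_of_mem rs h p.1 p.2 (List.mem_reverse.mp hp))
    (fun p _ => by simp [PySem.Dict.contains_empty])
    (by rw [List.map_reverse]; exact List.nodup_reverse.mpr h)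
  have hdown : pvDown (pvS rs) rs.reverse = (pvCanon 0 rs).reverse := by
    simpa using pvDown_reverse rs 0
  rw [htot, hrev, hloop, hdown]
  rw [show PySem.Dict.empty.items ++ (pvCanon 0 rs).reverse = (pvCanon 0 rs).reverse by
    simp [PySem.Dict.empty]]
  rw [List.reverse_reverse]
  rw [PySem.Dict.items_foldl_insert_fresh _ Prod.fst Prod.snd PySem.Dict.empty
    (fun a _ => by simp [PySem.Dict.contains_empty])
    (by rw [pvCanon_keys]; exact h)]
  simp [PySem.Dict.empty]

-- A's loop body, named so the invariant lemma can talk about it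
def pvStepA (rd : PySem.Dict String String)
    (st : PySem.Dict String Int × Int × String) (ik : Int × String) :
    PySem.Dict String Int × Int × String :=
  let offset := st.1
  let prior_chains_len :=
    if ik.1 > 0 then st.2.1 + PySem.Str.len (rd.getD st.2.2 "") else st.2.1
  (offset.insert ik.2 prior_chains_len, prior_chains_len, ik.2)

theorem A_loop (rd : PySem.Dict String String) (rest : List (String × String)) :
    ∀ (i : Int) (off : PySem.Dict String Int) (pcl : Int) (pk pv : String),
    1 ≤ i →
    rd.getD pk "" = pv →
    (∀ p ∈ rest, rd.getD p.1 "" = p.2) →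
    (∀ p ∈ rest, off.contains p.1 = false) →
    (rest.map Prod.fst).Nodup →
    ((PySem.List.enumerate (rest.map Prod.fst) i).foldl (pvStepA rd) (off, pcl, pk)).1.items
      = off.items ++ pvCanon (pcl + PySem.Str.len pv) rest := by
  induction rest with
  | nil => intro i off pcl pk pv _ _ _ _ _; simp [PySem.List.enumerate_nil, pvCanon]
  | cons p t ih =>
    intro i off pcl pk pv hi hpk hlook hfresh hnd
    cases p with | mk k v =>
    rw [List.map_cons, List.nodup_cons] at hnd
    obtain ⟨hknt, hndt⟩ := hnd
    have hlk : rd.getD k "" = v := hlook (k, v) List.mem_cons_self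
    have hfk : off.contains k = false := hfresh (k, v) List.mem_cons_self
    simp only [List.map_cons, PySem.List.enumerate_cons, List.foldl_cons]
    have hstep : pvStepA rd (off, pcl, pk) (i, k)
        = (off.insert k (pcl + PySem.Str.len pv), pcl + PySem.Str.len pv, k) := by
      simp [pvStepA, show i > 0 by omega, hpk]
    rw [hstep,
      ih (i + 1) (off.insert k (pcl + PySem.Str.len pv)) (pcl + PySem.Str.len pv) k v
        (by omega) hlk
        (fun p hp => hlook p (List.mem_cons_of_mem _ hp))
        (fun p hp => by
          rw [PySem.Dict.contains_insert]
          have hne : p.1 ≠ k := fun he => hknt (List.mem_map.mpr ⟨p, hp, he⟩)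
          simp [hne, hfresh p (List.mem_cons_of_mem _ hp)])
        hndt]
    rw [PySem.Dict.items_insert_of_not_contains _ _ hfk]
    simp [pvCanon]

theorem a_eq_canon (rs : List (String × String)) (h : (rs.map Prod.fst).Nodup) :
    pdb_to_pose_offset rs = pvCanon 0 rs := by
  unfold pdb_to_pose_offset
  cases rs with
  | nil => rfl
  | cons p t =>
    cases p with | mk k v =>
    have h' := h
    rw [List.map_cons, List.nodup_cons] at h'
    obtain ⟨hknt, hndt⟩ := h'
    have hkeys : (PySem.Dict.mk ((k, v) :: t)).keys = k :: t.map Prod.fst := by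
      simp [PySem.Dict.keys]
    have hlkk : (PySem.Dict.mk ((k, v) :: t)).getD k "" = v :=
      getD_mk_of_mem _ h k v List.mem_cons_self
    have hlookt : ∀ p ∈ t, (PySem.Dict.mk ((k, v) :: t)).getD p.1 "" = p.2 := by
      intro p hp
      exact getD_mk_of_mem _ h p.1 p.2 (List.mem_cons_of_mem _ (by simpa using hp))
    show ((PySem.List.enumerate (PySem.Dict.mk ((k, v) :: t)).keys 0).foldl
        (pvStepA (PySem.Dict.mk ((k, v) :: t))) (PySem.Dict.empty, 0, "")).1.items
      = pvCanon 0 ((k, v) :: t)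
    rw [hkeys]
    simp only [PySem.List.enumerate_cons, List.foldl_cons]
    have hstep : pvStepA (PySem.Dict.mk ((k, v) :: t)) (PySem.Dict.empty, 0, "") (0, k)
        = (PySem.Dict.empty.insert k 0, 0, k) := by simp [pvStepA]
    rw [hstep,
      A_loop (PySem.Dict.mk ((k, v) :: t)) t (0 + 1) (PySem.Dict.empty.insert k 0) 0 k v
        (by omega) hlkk hlookt
        (fun p hp => by
          rw [PySem.Dict.contains_insert]
          have hne : p.1 ≠ k := fun he => hknt (List.mem_map.mpr ⟨p, hp, he⟩)
          simp [hne, PySem.Dict.contains_empty])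
        hndt]
    rw [PySem.Dict.items_insert_of_not_contains _ _ (by simp [PySem.Dict.contains_empty])]
    simp [pvCanon, PySem.Dict.empty]

-- ===== VERDICT (by name: the statement is the Claim_ definition above) =====
theorem pdb_to_pose_offset_spec : Claim_equal_pdb_to_pose_offset := by
  intro rs _ hpre
  unfold Spec_pdb_to_pose_offset
  rw [a_eq_canon rs hpre, alt_eq_canon rs hpre]
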